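-- pv_equiv track=rewrite | github.com/Stunkz/ueProjet | Mare.py | jeu_fini
-- ===== SOURCE A (Python) =====
-- def case_vide(coord, grille):
--     return grille[coord[0]][coord[1]] == 0
--
-- def calcul_distance(coord_depart, coord_arrivee):
--     return (coord_arrivee[0] - coord_depart[0]), (coord_arrivee[1] - coord_depart[1])
--
-- def distance_pour_manger_pion(coord_depart, coord_arrivee):
--     distance = calcul_distance(coord_depart, coord_arrivee)
--     x = distance[0]
--     y = distance[1]
--     return ((x==2)and(y==0)) or ((x==0)and(y==2)) or ((x==-2)and(y==0)) or ((x==0)and(y==-2))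
--
-- def distance_pour_deplacement(coord_depart, coord_arrivee):
--     distance = calcul_distance(coord_depart, coord_arrivee)
--     x = distance[0]
--     y = distance[1]
--     return ((x==1)and(y==0)) or ((x==0)and(y==1)) or ((x==-1)and(y==0)) or ((x==0)and(y==-1))
--
-- def pion_mangeable(grille, coord_depart, joueur):
--     for i in range(len(grille)):
--         for j in range(len(grille)):
--             coord_arrivee = (i, j)
--             distance = calcul_distance(coord_depart, coord_arrivee)
--             pion_milieu = (coord_depart[0]+(distance[0]//2),coord_depart[1]+(distance[1]//2))
--             if distance_pour_manger_pion(coord_depart, coord_arrivee) and case_vide(coord_arrivee, grille) and grille[pion_milieu[0]][pion_milieu[1]] != joueur and grille[pion_milieu[0]][pion_milieu[1]] != 0: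
--                 return True
--     return False
--
-- def pion_deplacable(grille, coord_depart):
--     for i in range(len(grille)):
--         for j in range(len(grille)):
--             coord_arrivee = (i, j)
--             calcul_distance(coord_depart, coord_arrivee)
--             if case_vide(coord_arrivee, grille) and distance_pour_deplacement(coord_depart, coord_arrivee):
--                 return True
--     return False
--
-- def jeu_fini(grille, joueur):
--     #un des joueurs est en dessus de 6 pions
--     nb_pion_blanc = 0 #2
--     nb_pion_noir = 0 #1
--     for i in range(len(grille)):
--         for j in range(len(grille)):
--             if grille[i][j] == 1:
--                 nb_pion_noir+=1
--             if grille[i][j] == 2: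
--                 nb_pion_blanc+=1
--
--     #un des deux joueurs ne peut plus effectuer de déplacements avec ces pions
--     pion_noir_deplacable = 0
--     pion_blanc_deplacable = 0
--     for i in range(len(grille)):
--         for j in range(len(grille)):
--             if grille[i][j] == 1 and (pion_mangeable(grille, (i, j), 1) or pion_deplacable(grille, (i,j))):
--                 pion_noir_deplacable += 1
--             if grille[i][j] == 2 and (pion_mangeable(grille, (i, j), 2) or pion_deplacable(grille, (i,j))):
--                 pion_blanc_deplacable += 1
--
--     return (nb_pion_blanc < 6 or nb_pion_noir < 6) or (pion_noir_deplacable == 0 or pion_blanc_deplacable == 0)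
-- ===== SOURCE B (Python) =====
-- def _mobile(grille, n, i, j):
--     v = grille[i][j]
--     for di, dj in ((1, 0), (-1, 0), (0, 1), (0, -1)):
--         a, b = i + di, j + dj
--         if 0 <= a < n and 0 <= b < n:
--             if grille[a][b] == 0:
--                 return True
--             if grille[a][b] != v:
--                 c, d = i + 2 * di, j + 2 * dj
--                 if 0 <= c < n and 0 <= d < n and grille[c][d] == 0:
--                     return True
--     return False
--
-- def _side_mobile(grille, n, couleur):
--     for i in range(n):
--         row = grille[i]
--         for j in range(n):
--             if row[j] == couleur and _mobile(grille, n, i, j):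
--                 return True
--     return False
--
-- def jeu_fini(grille, joueur):
--     n = len(grille)
--     noir = 0
--     blanc = 0
--     for row in grille:
--         for v in row[:n]:
--             if v == 1:
--                 noir += 1
--             elif v == 2:
--                 blanc += 1
--     if blanc < 6 or noir < 6:
--         return True
--     return (not _side_mobile(grille, n, 1)) or (not _side_mobile(grille, n, 2))
-- ===== Notes on version B (the rewrite author's own statement) =====
-- stated objective: faster
-- what changed: Mobility of each pion is decided by inspecting only its 4 orthogonal neighbour cells (and the landing cell behind an enemy neighbour) instead of A's full-grid scan per pion, and the function returns early once the piece-count condition already decides the result.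
import Mathlib
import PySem

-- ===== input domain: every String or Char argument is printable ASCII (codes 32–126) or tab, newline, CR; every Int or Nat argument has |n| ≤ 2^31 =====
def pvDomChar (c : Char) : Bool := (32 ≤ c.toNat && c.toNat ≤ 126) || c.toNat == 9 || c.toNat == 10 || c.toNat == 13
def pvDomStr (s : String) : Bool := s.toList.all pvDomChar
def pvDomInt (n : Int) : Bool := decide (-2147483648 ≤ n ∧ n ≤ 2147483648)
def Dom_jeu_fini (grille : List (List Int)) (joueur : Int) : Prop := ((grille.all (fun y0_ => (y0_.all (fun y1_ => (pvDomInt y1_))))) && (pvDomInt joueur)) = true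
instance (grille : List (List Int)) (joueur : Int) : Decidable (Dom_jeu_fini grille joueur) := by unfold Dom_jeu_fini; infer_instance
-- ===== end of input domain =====

-- B checks only the 4 orthogonal neighbours of each pion instead of scanning the whole grid per
-- pion, and returns early on the piece-count condition; same return value on every grid A accepts.

-- ===== PORT A =====
-- grille[i][j]; every access either program makes is in range under Pre_jeu_fini, so the
-- default is never used on admitted inputs.
def pvCell (grille : List (List Int)) (i j : Int) : Int :=
  PySem.List.pyGetD (PySem.List.pyGetD grille i []) j 0

def pvCaseVide (coord : Int × Int) (grille : List (List Int)) : Bool :=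
  pvCell grille coord.1 coord.2 == 0

def pvCalculDistance (dep arr : Int × Int) : Int × Int := (arr.1 - dep.1, arr.2 - dep.2)

def pvDistManger (dep arr : Int × Int) : Bool :=
  let dist := pvCalculDistance dep arr
  let x := dist.1
  let y := dist.2
  (x == 2 && y == 0) || (x == 0 && y == 2) || (x == -2 && y == 0) || (x == 0 && y == -2)

def pvDistDepl (dep arr : Int × Int) : Bool :=
  let dist := pvCalculDistance dep arr
  let x := dist.1
  let y := dist.2
  (x == 1 && y == 0) || (x == 0 && y == 1) || (x == -1 && y == 0) || (x == 0 && y == -1)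

def pvPionMangeable (grille : List (List Int)) (coord : Int × Int) (joueur : Int) : Bool :=
  (PySem.List.pyRange 0 grille.length).any fun i =>
    (PySem.List.pyRange 0 grille.length).any fun j =>
      let arr := (i, j)
      let dist := pvCalculDistance coord arr
      let mil := (coord.1 + PySem.Int.floordiv dist.1 2, coord.2 + PySem.Int.floordiv dist.2 2)
      pvDistManger coord arr && pvCaseVide arr grille &&
        !(pvCell grille mil.1 mil.2 == joueur) && !(pvCell grille mil.1 mil.2 == 0)

def pvPionDeplacable (grille : List (List Int)) (coord : Int × Int) : Bool :=
  (PySem.List.pyRange 0 grille.length).any fun i =>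
    (PySem.List.pyRange 0 grille.length).any fun j =>
      pvCaseVide (i, j) grille && pvDistDepl coord (i, j)

def jeu_fini (grille : List (List Int)) (joueur : Int) : Bool :=
  -- counts = (nb_pion_noir, nb_pion_blanc)
  let counts : Int × Int :=
    (PySem.List.pyRange 0 grille.length).foldl (fun c i =>
      (PySem.List.pyRange 0 grille.length).foldl (fun c j =>
        let c1 := if pvCell grille i j == 1 then (c.1 + 1, c.2) else c
        if pvCell grille i j == 2 then (c1.1, c1.2 + 1) else c1) c) (0, 0)
  -- dep = (pion_noir_deplacable, pion_blanc_deplacable)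
  let dep : Int × Int :=
    (PySem.List.pyRange 0 grille.length).foldl (fun c i =>
      (PySem.List.pyRange 0 grille.length).foldl (fun c j =>
        let c1 := if pvCell grille i j == 1 &&
            (pvPionMangeable grille (i, j) 1 || pvPionDeplacable grille (i, j)) then
            (c.1 + 1, c.2) else c
        if pvCell grille i j == 2 &&
            (pvPionMangeable grille (i, j) 2 || pvPionDeplacable grille (i, j)) then
          (c1.1, c1.2 + 1) else c1) c) (0, 0)
  (decide (counts.2 < 6) || decide (counts.1 < 6)) || (dep.1 == 0 || dep.2 == 0)

-- ===== PORT B =====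
def pvDirs : List (Int × Int) := [(1, 0), (-1, 0), (0, 1), (0, -1)]

def pvMobile (grille : List (List Int)) (n i j : Int) : Bool :=
  let v := pvCell grille i j
  pvDirs.any fun d =>
    let a := i + d.1
    let b := j + d.2
    if 0 ≤ a ∧ a < n ∧ 0 ≤ b ∧ b < n then
      if pvCell grille a b == 0 then true
      else if pvCell grille a b != v then
        let c := i + 2 * d.1
        let e := j + 2 * d.2
        decide (0 ≤ c ∧ c < n ∧ 0 ≤ e ∧ e < n) && (pvCell grille c e == 0)
      else false
    else false

def pvSideMobile (grille : List (List Int)) (n couleur : Int) : Bool :=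
  (PySem.List.pyRange 0 n).any fun i =>
    let row := PySem.List.pyGetD grille i []
    (PySem.List.pyRange 0 n).any fun j =>
      PySem.List.pyGetD row j 0 == couleur && pvMobile grille n i j

def jeu_fini_alt (grille : List (List Int)) (joueur : Int) : Bool :=
  let n : Int := grille.length
  let counts : Int × Int :=
    grille.foldl (fun c row =>
      (PySem.List.slice row none (some n)).foldl (fun c v =>
        if v == 1 then (c.1 + 1, c.2) else if v == 2 then (c.1, c.2 + 1) else c) c) (0, 0)
  if decide (counts.2 < 6) || decide (counts.1 < 6) then true
  else !pvSideMobile grille n 1 || !pvSideMobile grille n 2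

-- ===== PRECONDITION & SPEC =====
-- Pre_ admits exactly the grids on which the Python A returns: A indexes grille[i][j] for all
-- i, j < len(grille), so every row must have at least len(grille) entries (IndexError otherwise).
def Pre_jeu_fini (grille : List (List Int)) (joueur : Int) : Prop :=
  ∀ row ∈ grille, grille.length ≤ row.length
instance (grille : List (List Int)) (joueur : Int) : Decidable (Pre_jeu_fini grille joueur) := by
  unfold Pre_jeu_fini; infer_instance
def pvWitness_jeu_fini : List (List Int) × Int := ([[1, 2], [0, 0]], 1)
def Spec_jeu_fini (grille : List (List Int)) (joueur : Int) (out : Bool) : Prop := out = jeu_fini_alt grille joueur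
instance (grille : List (List Int)) (joueur : Int) (out : Bool) : Decidable (Spec_jeu_fini grille joueur out) := by unfold Spec_jeu_fini; infer_instance

-- ===== CLAIM (what is proved, stated in full; the proofs are below) =====
def Claim_equal_jeu_fini : Prop := ∀ (grille : List (List Int)) (joueur : Int), Dom_jeu_fini grille joueur → Pre_jeu_fini grille joueur → Spec_jeu_fini grille joueur (jeu_fini grille joueur)

-- ===== LEMMAS AND PROOFS =====

lemma pv_any_pyRange {b : Int} {p : Int → Bool} :
    (PySem.List.pyRange 0 b).any p = true ↔ ∃ x : Int, (0 ≤ x ∧ x < b) ∧ p x = true := by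
  simp [List.any_eq_true, PySem.List.mem_pyRange_one]

-- fold over range(n) reading row[j] = fold over the first n entries of row
lemma pv_foldl_range_take {β : Type} (row : List Int) (n : Nat) (h : n ≤ row.length)
    (f : β → Int → β) (init : β) :
    (PySem.List.pyRange 0 (n : Int)).foldl (fun acc j => f acc (PySem.List.pyGetD row j 0)) init
      = (row.take n).foldl f init := by
  have hcongr : ∀ (acc : β), ∀ x ∈ PySem.List.pyRange 0 (n : Int),
      (fun acc j => f acc (PySem.List.pyGetD row j 0)) acc x
        = (fun acc j => f acc (PySem.List.pyGetD (row.take n) j 0)) acc x := by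
    intro acc x hx
    rw [PySem.List.mem_pyRange_one] at hx
    simp only
    rw [PySem.List.pyGetD_eq_getElem row 0 hx.1 (by omega),
        PySem.List.pyGetD_eq_getElem (row.take n) 0 hx.1 (by simp; omega)]
    congr 1
    exact (List.getElem_take).symm
  rw [PySem.List.foldl_congr_mem _ _ _ _ hcongr]
  have h2 := PySem.List.foldl_pyRange_zero_pyGetD' (row.take n) 0 f init
  rw [List.length_take, min_eq_left h] at h2
  exact h2

def pvInb (n a b : Int) : Prop := 0 ≤ a ∧ a < n ∧ 0 ≤ b ∧ b < n

def pvD (grille : List (List Int)) (a b : Int) : Prop :=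
  pvInb (grille.length : Int) a b ∧ pvCell grille a b = 0

def pvM (grille : List (List Int)) (v ta tb ma mb : Int) : Prop :=
  pvInb (grille.length : Int) ta tb ∧ pvCell grille ta tb = 0 ∧
    pvCell grille ma mb ≠ v ∧ pvCell grille ma mb ≠ 0

lemma pv_depl_iff (grille : List (List Int)) (i j : Int) :
    pvPionDeplacable grille (i, j) = true ↔
      pvD grille (i+1) j ∨ pvD grille (i-1) j ∨ pvD grille i (j+1) ∨ pvD grille i (j-1) := by
  unfold pvPionDeplacable
  simp only [pv_any_pyRange, pvCaseVide, pvDistDepl, pvCalculDistance, pvD, pvInb,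
    Bool.and_eq_true, Bool.or_eq_true, beq_iff_eq]
  constructor
  · rintro ⟨a, ⟨ha0, haN⟩, b, ⟨hb0, hbN⟩, hvide, hdist⟩
    rcases hdist with ((h | h) | h) | h
    · left; have ea : a = i + 1 := by omega
      have eb : b = j := by omega
      subst ea; subst eb; exact ⟨⟨by omega, by omega, by omega, by omega⟩, hvide⟩
    · right; right; left; have ea : a = i := by omega
      have eb : b = j + 1 := by omega
      subst ea; subst eb; exact ⟨⟨by omega, by omega, by omega, by omega⟩, hvide⟩
    · right; left; have ea : a = i - 1 := by omega
      have eb : b = j := by omega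
      subst ea; subst eb; exact ⟨⟨by omega, by omega, by omega, by omega⟩, hvide⟩
    · right; right; right; have ea : a = i := by omega
      have eb : b = j - 1 := by omega
      subst ea; subst eb; exact ⟨⟨by omega, by omega, by omega, by omega⟩, hvide⟩
  · rintro (⟨⟨h1, h2, h3, h4⟩, hc⟩ | ⟨⟨h1, h2, h3, h4⟩, hc⟩ | ⟨⟨h1, h2, h3, h4⟩, hc⟩ | ⟨⟨h1, h2, h3, h4⟩, hc⟩)
    · exact ⟨i + 1, ⟨by omega, by omega⟩, j, ⟨by omega, by omega⟩, hc, by omega⟩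
    · exact ⟨i - 1, ⟨by omega, by omega⟩, j, ⟨by omega, by omega⟩, hc, by omega⟩
    · exact ⟨i, ⟨by omega, by omega⟩, j + 1, ⟨by omega, by omega⟩, hc, by omega⟩
    · exact ⟨i, ⟨by omega, by omega⟩, j - 1, ⟨by omega, by omega⟩, hc, by omega⟩

lemma pv_mang_iff (grille : List (List Int)) (i j v : Int) :
    pvPionMangeable grille (i, j) v = true ↔
      pvM grille v (i+2) j (i+1) j ∨ pvM grille v (i-2) j (i-1) j ∨
      pvM grille v i (j+2) i (j+1) ∨ pvM grille v i (j-2) i (j-1) := by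
  unfold pvPionMangeable
  simp only [pv_any_pyRange, pvDistManger, pvCaseVide, pvCalculDistance, pvM, pvInb,
    Bool.and_eq_true, Bool.or_eq_true, beq_iff_eq, Bool.not_eq_true', beq_eq_false_iff_ne]
  constructor
  · rintro ⟨a, ⟨ha0, haN⟩, b, ⟨hb0, hbN⟩, ⟨⟨hdist, hvide⟩, hne1⟩, hne2⟩
    rcases hdist with ((h | h) | h) | h
    · left
      rw [show a - i = (2:Int) from by omega, show b - j = (0:Int) from by omega] at hne1 hne2
      rw [show PySem.Int.floordiv 2 2 = (1:Int) from by decide,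
          show PySem.Int.floordiv 0 2 = (0:Int) from by decide, add_zero] at hne1 hne2
      have ea : a = i + 2 := by omega
      have eb : b = j := by omega
      subst ea; subst eb
      exact ⟨⟨by omega, by omega, by omega, by omega⟩, hvide, hne1, hne2⟩
    · right; right; left
      rw [show a - i = (0:Int) from by omega, show b - j = (2:Int) from by omega] at hne1 hne2
      rw [show PySem.Int.floordiv 2 2 = (1:Int) from by decide,
          show PySem.Int.floordiv 0 2 = (0:Int) from by decide, add_zero] at hne1 hne2
      have ea : a = i := by omega
      have eb : b = j + 2 := by omega
      subst ea; subst eb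
      exact ⟨⟨by omega, by omega, by omega, by omega⟩, hvide, hne1, hne2⟩
    · right; left
      rw [show a - i = (-2:Int) from by omega, show b - j = (0:Int) from by omega] at hne1 hne2
      rw [show PySem.Int.floordiv (-2) 2 = (-1:Int) from by decide,
          show PySem.Int.floordiv 0 2 = (0:Int) from by decide, add_zero] at hne1 hne2
      have ea : a = i - 2 := by omega
      have eb : b = j := by omega
      subst ea; subst eb
      refine ⟨⟨by omega, by omega, by omega, by omega⟩, hvide, ?_, ?_⟩
      · rw [show i + -1 = i - 1 from by ring] at hne1; exact hne1
      · rw [show i + -1 = i - 1 from by ring] at hne2; exact hne2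
    · right; right; right
      rw [show a - i = (0:Int) from by omega, show b - j = (-2:Int) from by omega] at hne1 hne2
      rw [show PySem.Int.floordiv (-2) 2 = (-1:Int) from by decide,
          show PySem.Int.floordiv 0 2 = (0:Int) from by decide, add_zero] at hne1 hne2
      have ea : a = i := by omega
      have eb : b = j - 2 := by omega
      subst ea; subst eb
      refine ⟨⟨by omega, by omega, by omega, by omega⟩, hvide, ?_, ?_⟩
      · rw [show j + -1 = j - 1 from by ring] at hne1; exact hne1
      · rw [show j + -1 = j - 1 from by ring] at hne2; exact hne2
  · rintro (⟨⟨h1, h2, h3, h4⟩, hc, hne1, hne2⟩ | ⟨⟨h1, h2, h3, h4⟩, hc, hne1, hne2⟩ |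
      ⟨⟨h1, h2, h3, h4⟩, hc, hne1, hne2⟩ | ⟨⟨h1, h2, h3, h4⟩, hc, hne1, hne2⟩)
    · refine ⟨i + 2, ⟨by omega, by omega⟩, j, ⟨by omega, by omega⟩, ⟨⟨by omega, ?_⟩, ?_⟩, ?_⟩ <;>
        first | exact hc | (rw [show i + 2 - i = (2:Int) from by ring, show j - j = (0:Int) from by ring,
          show PySem.Int.floordiv 2 2 = (1:Int) from by decide,
          show PySem.Int.floordiv 0 2 = (0:Int) from by decide, add_zero]; first | exact hne1 | exact hne2)
    · refine ⟨i - 2, ⟨by omega, by omega⟩, j, ⟨by omega, by omega⟩, ⟨⟨by omega, ?_⟩, ?_⟩, ?_⟩ <;>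
        first | exact hc | (rw [show i - 2 - i = (-2:Int) from by ring, show j - j = (0:Int) from by ring,
          show PySem.Int.floordiv (-2) 2 = (-1:Int) from by decide,
          show PySem.Int.floordiv 0 2 = (0:Int) from by decide, add_zero,
          show i + -1 = i - 1 from by ring]; first | exact hne1 | exact hne2)
    · refine ⟨i, ⟨by omega, by omega⟩, j + 2, ⟨by omega, by omega⟩, ⟨⟨by omega, ?_⟩, ?_⟩, ?_⟩ <;>
        first | exact hc | (rw [show i - i = (0:Int) from by ring, show j + 2 - j = (2:Int) from by ring,
          show PySem.Int.floordiv 2 2 = (1:Int) from by decide,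
          show PySem.Int.floordiv 0 2 = (0:Int) from by decide, add_zero]; first | exact hne1 | exact hne2)
    · refine ⟨i, ⟨by omega, by omega⟩, j - 2, ⟨by omega, by omega⟩, ⟨⟨by omega, ?_⟩, ?_⟩, ?_⟩ <;>
        first | exact hc | (rw [show i - i = (0:Int) from by ring, show j - 2 - j = (-2:Int) from by ring,
          show PySem.Int.floordiv (-2) 2 = (-1:Int) from by decide,
          show PySem.Int.floordiv 0 2 = (0:Int) from by decide, add_zero,
          show j + -1 = j - 1 from by ring]; first | exact hne1 | exact hne2)

lemma pv_body_iff (grille : List (List Int)) (n v a b c e : Int) :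
    ((if 0 ≤ a ∧ a < n ∧ 0 ≤ b ∧ b < n then
        if (pvCell grille a b == 0) = true then true
        else
          if (pvCell grille a b != v) = true then
            decide (0 ≤ c ∧ c < n ∧ 0 ≤ e ∧ e < n) && (pvCell grille c e == 0)
          else false
      else false) = true)
    ↔ (pvInb n a b ∧ (pvCell grille a b = 0 ∨
        (pvCell grille a b ≠ v ∧ pvInb n c e ∧ pvCell grille c e = 0))) := by
  unfold pvInb
  split_ifs with h1 h2 h3
  · simp_all
  · simp_all
  · simp_all
  · simp_all

lemma pv_mobile_iff (grille : List (List Int)) (n i j v : Int) (hv : pvCell grille i j = v) :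
    pvMobile grille n i j = true ↔
      (pvInb n (i+1) j ∧ (pvCell grille (i+1) j = 0 ∨ (pvCell grille (i+1) j ≠ v ∧ pvInb n (i+2) j ∧ pvCell grille (i+2) j = 0))) ∨
      (pvInb n (i-1) j ∧ (pvCell grille (i-1) j = 0 ∨ (pvCell grille (i-1) j ≠ v ∧ pvInb n (i-2) j ∧ pvCell grille (i-2) j = 0))) ∨
      (pvInb n i (j+1) ∧ (pvCell grille i (j+1) = 0 ∨ (pvCell grille i (j+1) ≠ v ∧ pvInb n i (j+2) ∧ pvCell grille i (j+2) = 0))) ∨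
      (pvInb n i (j-1) ∧ (pvCell grille i (j-1) = 0 ∨ (pvCell grille i (j-1) ≠ v ∧ pvInb n i (j-2) ∧ pvCell grille i (j-2) = 0))) := by
  unfold pvMobile pvDirs
  rw [hv]
  simp only [List.any_cons, List.any_nil, Bool.or_false, Bool.or_eq_true]
  rw [pv_body_iff, pv_body_iff, pv_body_iff, pv_body_iff]
  norm_num
  rw [show i + -1 = i - 1 from by ring, show i + -2 = i - 2 from by ring,
      show j + -1 = j - 1 from by ring, show j + -2 = j - 2 from by ring]

lemma pv_dir_eq (grille : List (List Int)) (n v a b c e : Int)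
    (hnb : pvInb n c e → pvInb n a b) :
    (pvInb n a b ∧ (pvCell grille a b = 0 ∨
        (pvCell grille a b ≠ v ∧ pvInb n c e ∧ pvCell grille c e = 0)))
    ↔ ((pvInb n a b ∧ pvCell grille a b = 0) ∨
        (pvInb n c e ∧ pvCell grille c e = 0 ∧ pvCell grille a b ≠ v ∧ pvCell grille a b ≠ 0)) := by
  by_cases h0 : pvCell grille a b = 0 <;> tauto

-- pointwise: A's (mangeable or deplacable) for a pion of colour v = B's neighbour check
set_option maxHeartbeats 1000000 in
lemma pv_mob_eq (grille : List (List Int)) (i j v : Int) (hv : pvCell grille i j = v)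
    (hi : 0 ≤ i) (hi' : i < (grille.length : Int)) (hj : 0 ≤ j) (hj' : j < (grille.length : Int)) :
    (pvPionMangeable grille (i, j) v || pvPionDeplacable grille (i, j))
      = pvMobile grille (grille.length : Int) i j := by
  rw [Bool.eq_iff_iff, Bool.or_eq_true, pv_mang_iff grille i j v, pv_depl_iff grille i j,
      pv_mobile_iff grille (grille.length : Int) i j v hv]
  simp only [pvD, pvM]
  rw [pv_dir_eq grille _ v (i+1) j (i+2) j (by unfold pvInb; omega),
      pv_dir_eq grille _ v (i-1) j (i-2) j (by unfold pvInb; omega),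
      pv_dir_eq grille _ v i (j+1) i (j+2) (by unfold pvInb; omega),
      pv_dir_eq grille _ v i (j-1) i (j-2) (by unfold pvInb; omega)]
  constructor
  · rintro ((h|h|h|h)|(h|h|h|h))
    · exact Or.inl (Or.inr h)
    · exact Or.inr (Or.inl (Or.inr h))
    · exact Or.inr (Or.inr (Or.inl (Or.inr h)))
    · exact Or.inr (Or.inr (Or.inr (Or.inr h)))
    · exact Or.inl (Or.inl h)
    · exact Or.inr (Or.inl (Or.inl h))
    · exact Or.inr (Or.inr (Or.inl (Or.inl h)))
    · exact Or.inr (Or.inr (Or.inr (Or.inl h)))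
  · rintro ((h|h)|(h|h)|(h|h)|(h|h))
    · exact Or.inr (Or.inl h)
    · exact Or.inl (Or.inl h)
    · exact Or.inr (Or.inr (Or.inl h))
    · exact Or.inl (Or.inr (Or.inl h))
    · exact Or.inr (Or.inr (Or.inr (Or.inl h)))
    · exact Or.inl (Or.inr (Or.inr (Or.inl h)))
    · exact Or.inr (Or.inr (Or.inr (Or.inr h)))
    · exact Or.inl (Or.inr (Or.inr (Or.inr h)))

-- proof-side names for the two loop bodies of A's first loop and B's count loop
def pvGCnt : (Int × Int) → Int → (Int × Int) := fun c v =>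
  let c1 := if v == 1 then (c.1 + 1, c.2) else c
  if v == 2 then (c1.1, c1.2 + 1) else c1

def pvGCntB : (Int × Int) → Int → (Int × Int) := fun c v =>
  if v == 1 then (c.1 + 1, c.2) else if v == 2 then (c.1, c.2 + 1) else c

lemma pv_gcnt_eq : pvGCnt = pvGCntB := by
  funext c v
  unfold pvGCnt pvGCntB
  by_cases h1 : v = 1 <;> by_cases h2 : v = 2 <;> simp [h1, h2]

-- A's counting loop equals B's counting loop
lemma pv_cnt_eq (grille : List (List Int)) (hpre : ∀ row ∈ grille, grille.length ≤ row.length) :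
    (PySem.List.pyRange 0 grille.length).foldl (fun c i =>
      (PySem.List.pyRange 0 grille.length).foldl
        (fun c j => pvGCnt c (pvCell grille i j)) c) ((0 : Int), (0 : Int))
    = grille.foldl (fun c row =>
        (PySem.List.slice row none (some (grille.length : Int))).foldl pvGCntB c) (0, 0) := by
  have h1 : (PySem.List.pyRange 0 grille.length).foldl (fun c i =>
      (PySem.List.pyRange 0 grille.length).foldl
        (fun c j => pvGCnt c (pvCell grille i j)) c) ((0 : Int), (0 : Int))
      = grille.foldl (fun c row =>
        (PySem.List.pyRange 0 grille.length).foldl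
          (fun c j => pvGCnt c (PySem.List.pyGetD row j 0)) c) (0, 0) :=
    PySem.List.foldl_pyRange_zero_pyGetD' grille []
      (fun c row => (PySem.List.pyRange 0 grille.length).foldl
        (fun c j => pvGCnt c (PySem.List.pyGetD row j 0)) c) (0, 0)
  rw [h1]
  refine PySem.List.foldl_congr_mem _ _ _ _ ?_
  intro acc row hrow
  rw [PySem.List.slice_to row (by positivity), Int.toNat_natCast]
  rw [← pv_gcnt_eq]
  exact pv_foldl_range_take row grille.length (hpre row hrow) pvGCnt acc

-- A's mobility predicate for colour k at (i, j)
def pvP (grille : List (List Int)) (k i j : Int) : Bool :=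
  pvCell grille i j == k && (pvPionMangeable grille (i, j) k || pvPionDeplacable grille (i, j))

-- proof-side name for the body of A's second loop
def pvGDep (grille : List (List Int)) : (Int × Int) → Int → Int → (Int × Int) := fun c i j =>
  let c1 := if pvP grille 1 i j then (c.1 + 1, c.2) else c
  if pvP grille 2 i j then (c1.1, c1.2 + 1) else c1

def pvSum (grille : List (List Int)) (k : Int) : Int :=
  ((PySem.List.pyRange 0 grille.length).map (fun i =>
    (((PySem.List.pyRange 0 grille.length).countP (fun j => pvP grille k i j) : Nat) : Int))).sum

lemma pv_gdep_eq (grille : List (List Int)) (c : Int × Int) (i j : Int) :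
    pvGDep grille c i j = (c.1 + (if pvP grille 1 i j then (1:Int) else 0),
        c.2 + (if pvP grille 2 i j then (1:Int) else 0)) := by
  unfold pvGDep
  by_cases h1 : pvP grille 1 i j <;> by_cases h2 : pvP grille 2 i j <;> simp [h1, h2]

-- A's second loop computes the pair of double sums
lemma pv_dep_eq (grille : List (List Int)) :
    (PySem.List.pyRange 0 grille.length).foldl (fun c i =>
      (PySem.List.pyRange 0 grille.length).foldl
        (fun c j => pvGDep grille c i j) c) ((0 : Int), (0 : Int))
    = (pvSum grille 1, pvSum grille 2) := by
  have e1 : (PySem.List.pyRange 0 grille.length).foldl (fun c i =>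
      (PySem.List.pyRange 0 grille.length).foldl
        (fun c j => pvGDep grille c i j) c) ((0 : Int), (0 : Int))
      = (PySem.List.pyRange 0 grille.length).foldl (fun c i =>
        (PySem.List.pyRange 0 grille.length).foldl
          (fun c j => (c.1 + (if pvP grille 1 i j then (1:Int) else 0),
            c.2 + (if pvP grille 2 i j then (1:Int) else 0))) c) (0, 0) := by
    refine PySem.List.foldl_congr_mem _ _ _ _ ?_
    intro acc i _
    refine PySem.List.foldl_congr_mem _ _ _ _ ?_
    intro acc2 j _
    exact pv_gdep_eq grille acc2 i j
  rw [e1]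
  have e2 : (PySem.List.pyRange 0 grille.length).foldl (fun c i =>
      (PySem.List.pyRange 0 grille.length).foldl
        (fun c j => (c.1 + (if pvP grille 1 i j then (1:Int) else 0),
          c.2 + (if pvP grille 2 i j then (1:Int) else 0))) c) ((0 : Int), (0 : Int))
      = (PySem.List.pyRange 0 grille.length).foldl (fun c i =>
        ((PySem.List.pyRange 0 grille.length).foldl
          (fun a j => a + (if pvP grille 1 i j then (1:Int) else 0)) c.1,
         (PySem.List.pyRange 0 grille.length).foldl
          (fun a j => a + (if pvP grille 2 i j then (1:Int) else 0)) c.2)) (0, 0) := by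
    refine PySem.List.foldl_congr_mem _ _ _ _ ?_
    intro acc i _
    exact PySem.List.foldl_prod_mk
      (fun a j => a + (if pvP grille 1 i j then (1:Int) else 0))
      (fun a j => a + (if pvP grille 2 i j then (1:Int) else 0))
      (PySem.List.pyRange 0 grille.length) acc.1 acc.2
  rw [e2]
  rw [PySem.List.foldl_prod_mk
      (fun a i => (PySem.List.pyRange 0 grille.length).foldl
        (fun a j => a + (if pvP grille 1 i j then (1:Int) else 0)) a)
      (fun a i => (PySem.List.pyRange 0 grille.length).foldl
        (fun a j => a + (if pvP grille 2 i j then (1:Int) else 0)) a)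
      (PySem.List.pyRange 0 grille.length) 0 0]
  have comp : ∀ k : Int, (PySem.List.pyRange 0 grille.length).foldl
      (fun a i => (PySem.List.pyRange 0 grille.length).foldl
        (fun a j => a + (if pvP grille k i j then (1:Int) else 0)) a) 0 = pvSum grille k := by
    intro k
    have e3 : (PySem.List.pyRange 0 grille.length).foldl
        (fun a i => (PySem.List.pyRange 0 grille.length).foldl
          (fun a j => a + (if pvP grille k i j then (1:Int) else 0)) a) 0
        = (PySem.List.pyRange 0 grille.length).foldl
          (fun a i => a + ((PySem.List.pyRange 0 grille.length).map
            (fun j => if pvP grille k i j then (1:Int) else 0)).sum) 0 := by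
      refine PySem.List.foldl_congr_mem _ _ _ _ ?_
      intro acc i _
      exact PySem.List.foldl_add _ _ _
    rw [e3, PySem.List.foldl_add]
    unfold pvSum
    simp only [PySem.List.sum_map_ite_one_zero, zero_add]
  rw [comp 1, comp 2]

lemma pv_sum_cast_zero (l : List Int) (g : Int → Nat) :
    ((l.map fun x => ((g x : Int))).sum = 0) ↔ ∀ x ∈ l, g x = 0 := by
  induction l with
  | nil => simp
  | cons a t ih =>
    have hnn : 0 ≤ (t.map fun x => ((g x : Int))).sum := by
      apply List.sum_nonneg
      intro x hx
      simp only [List.mem_map] at hx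
      obtain ⟨y, _, rfl⟩ := hx
      positivity
    simp only [List.map_cons, List.sum_cons, List.mem_cons]
    constructor
    · intro h
      have h1 : g a = 0 := by omega
      have h2 : (t.map fun x => ((g x : Int))).sum = 0 := by omega
      rintro x (rfl | hm)
      · exact h1
      · exact ih.mp h2 x hm
    · intro h
      have h1 : g a = 0 := h a (Or.inl rfl)
      have h2 : (t.map fun x => ((g x : Int))).sum = 0 := ih.mpr fun x hx => h x (Or.inr hx)
      omega

lemma pv_sum_zero_iff (grille : List (List Int)) (k : Int) :
    pvSum grille k = 0 ↔ ∀ i : Int, (0 ≤ i ∧ i < (grille.length : Int)) →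
      ∀ j : Int, (0 ≤ j ∧ j < (grille.length : Int)) → ¬ pvP grille k i j = true := by
  unfold pvSum
  rw [pv_sum_cast_zero]
  constructor
  · intro h i hi j hj
    have hc := h i (PySem.List.mem_pyRange_one.mpr hi)
    rw [List.countP_eq_zero] at hc
    exact hc j (PySem.List.mem_pyRange_one.mpr hj)
  · intro h i hi
    rw [List.countP_eq_zero]
    intro j hj
    exact h i (PySem.List.mem_pyRange_one.mp hi) j (PySem.List.mem_pyRange_one.mp hj)

lemma pv_side_iff (grille : List (List Int)) (k : Int) :
    pvSideMobile grille (grille.length : Int) k = true ↔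
      ∃ i : Int, (0 ≤ i ∧ i < (grille.length : Int)) ∧
        ∃ j : Int, (0 ≤ j ∧ j < (grille.length : Int)) ∧
          (pvCell grille i j = k ∧ pvMobile grille (grille.length : Int) i j = true) := by
  unfold pvSideMobile
  simp only [pv_any_pyRange, Bool.and_eq_true, beq_iff_eq, pvCell]

lemma pv_P_iff (grille : List (List Int)) (k i j : Int)
    (hi : 0 ≤ i) (hi' : i < (grille.length : Int)) (hj : 0 ≤ j) (hj' : j < (grille.length : Int)) :
    pvP grille k i j = true ↔
      (pvCell grille i j = k ∧ pvMobile grille (grille.length : Int) i j = true) := by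
  unfold pvP
  simp only [Bool.and_eq_true, beq_iff_eq]
  constructor
  · rintro ⟨h1, h2⟩
    exact ⟨h1, by rw [← pv_mob_eq grille i j k h1 hi hi' hj hj']; exact h2⟩
  · rintro ⟨h1, h2⟩
    exact ⟨h1, by rw [pv_mob_eq grille i j k h1 hi hi' hj hj']; exact h2⟩

lemma pv_dep_side (grille : List (List Int)) (k : Int) :
    ((pvSum grille k == 0) : Bool) = !pvSideMobile grille (grille.length : Int) k := by
  rw [Bool.eq_iff_iff]
  simp only [beq_iff_eq, Bool.not_eq_true', Bool.eq_false_iff, ne_eq]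
  rw [pv_sum_zero_iff, pv_side_iff]
  constructor
  · intro h hex
    obtain ⟨i, hi, j, hj, hcell, hmob⟩ := hex
    exact h i hi j hj ((pv_P_iff grille k i j hi.1 hi.2 hj.1 hj.2).mpr ⟨hcell, hmob⟩)
  · intro h i hi j hj hP
    exact h ⟨i, hi, j, hj, (pv_P_iff grille k i j hi.1 hi.2 hj.1 hj.2).mp hP⟩

-- ===== VERDICT (by name: the statement is the Claim_ definition above) =====
theorem jeu_fini_spec : Claim_equal_jeu_fini := by
  intro grille joueur _hdom hpre
  unfold Spec_jeu_fini
  change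
    ((decide (((PySem.List.pyRange 0 grille.length).foldl (fun c i =>
        (PySem.List.pyRange 0 grille.length).foldl
          (fun c j => pvGCnt c (pvCell grille i j)) c) ((0 : Int), (0 : Int))).2 < 6) ||
      decide (((PySem.List.pyRange 0 grille.length).foldl (fun c i =>
        (PySem.List.pyRange 0 grille.length).foldl
          (fun c j => pvGCnt c (pvCell grille i j)) c) ((0 : Int), (0 : Int))).1 < 6)) ||
      (((PySem.List.pyRange 0 grille.length).foldl (fun c i =>
        (PySem.List.pyRange 0 grille.length).foldl
          (fun c j => pvGDep grille c i j) c) ((0 : Int), (0 : Int))).1 == 0 ||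
       ((PySem.List.pyRange 0 grille.length).foldl (fun c i =>
        (PySem.List.pyRange 0 grille.length).foldl
          (fun c j => pvGDep grille c i j) c) ((0 : Int), (0 : Int))).2 == 0))
    = (if decide ((grille.foldl (fun c row =>
          (PySem.List.slice row none (some (grille.length : Int))).foldl pvGCntB c)
            ((0 : Int), (0 : Int))).2 < 6) ||
        decide ((grille.foldl (fun c row =>
          (PySem.List.slice row none (some (grille.length : Int))).foldl pvGCntB c)
            ((0 : Int), (0 : Int))).1 < 6) then true
       else !pvSideMobile grille (grille.length : Int) 1 ||
            !pvSideMobile grille (grille.length : Int) 2)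
  rw [← pv_cnt_eq grille hpre, pv_dep_eq grille, pv_dep_side grille 1, pv_dep_side grille 2]
  by_cases hc : (decide (((PySem.List.pyRange 0 grille.length).foldl (fun c i =>
      (PySem.List.pyRange 0 grille.length).foldl
        (fun c j => pvGCnt c (pvCell grille i j)) c) ((0 : Int), (0 : Int))).2 < 6) ||
    decide (((PySem.List.pyRange 0 grille.length).foldl (fun c i =>
      (PySem.List.pyRange 0 grille.length).foldl
        (fun c j => pvGCnt c (pvCell grille i j)) c) ((0 : Int), (0 : Int))).1 < 6)) = true
  · rw [hc]; simp
  · rw [Bool.not_eq_true] at hc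
    rw [hc]; simp
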